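-- pv_equiv track=rewrite | github.com/wangzhong-cn/EasyXT_KLC | tools/stability_30d_report.py | _count_consecutive_fails
-- ===== SOURCE A (Python) =====
-- from typing import Any
--
-- def _gate(r: dict[str, Any]) -> bool:
--     return bool(r.get("strict_gate_pass", r.get("strict_pass", False)))
--
-- def _count_consecutive_fails(records: list[dict[str, Any]]) -> int:
--     """从记录末尾往前数连续失败天数。"""
--     count = 0
--     for r in reversed(records):
--         if not _gate(r):
--             count += 1
--         else:
--             break
--     return count
-- ===== SOURCE B (Python) =====
-- from typing import Any
--
-- def _gate(r: dict[str, Any]) -> bool: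
--     return bool(r.get("strict_gate_pass", r.get("strict_pass", False)))
--
-- def _count_consecutive_fails(records: list[dict[str, Any]]) -> int:
--     """Forward scan: find the index of the last passing record, derive the tail length."""
--     last_pass = -1
--     for i, r in enumerate(records):
--         if _gate(r):
--             last_pass = i
--     return len(records) - 1 - last_pass
-- ===== Notes on version B (the rewrite author's own statement) =====
-- stated objective: alternative
-- what changed: Replaces the reverse iteration with an early break and a running fail counter by a forward scan that records the index of the last passing record and derives the trailing-fail count arithmetically as len(records) - 1 - last_pass.
import Mathlib
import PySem

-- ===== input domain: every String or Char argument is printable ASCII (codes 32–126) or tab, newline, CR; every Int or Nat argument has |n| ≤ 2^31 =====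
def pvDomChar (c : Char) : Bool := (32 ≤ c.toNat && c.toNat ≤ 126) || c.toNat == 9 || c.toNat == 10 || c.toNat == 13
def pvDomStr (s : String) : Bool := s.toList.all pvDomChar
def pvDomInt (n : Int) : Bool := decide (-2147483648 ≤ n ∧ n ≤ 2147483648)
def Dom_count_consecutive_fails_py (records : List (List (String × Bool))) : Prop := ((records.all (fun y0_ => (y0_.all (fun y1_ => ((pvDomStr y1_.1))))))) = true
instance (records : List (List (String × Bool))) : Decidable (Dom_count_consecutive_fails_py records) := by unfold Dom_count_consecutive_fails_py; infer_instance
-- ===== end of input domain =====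

-- B changes the decomposition: a forward scan recording the last passing index,
-- then arithmetic, instead of A's reverse loop with an early break. Same cost.

-- shared helper: Python's _gate(r) = bool(r.get("strict_gate_pass", r.get("strict_pass", False)))
def pyGate (r : List (String × Bool)) : Bool :=
  (PySem.Dict.mk r).getD "strict_gate_pass" ((PySem.Dict.mk r).getD "strict_pass" false)

-- ===== PORT A =====
-- the reversed-loop with break: structural recursion over records.reverse carrying count
def cfA_go : List (List (String × Bool)) → Int → Int
  | [], count => count
  | r :: rest, count => if ¬ pyGate r then cfA_go rest (count + 1) else count

def count_consecutive_fails_py (records : List (List (String × Bool))) : Int :=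
  cfA_go records.reverse 0

-- ===== PORT B =====
-- forward enumerate loop tracking last_pass, then len - 1 - last_pass
def cfB_go : List (List (String × Bool)) → Int → Int → Int
  | [], _, last_pass => last_pass
  | r :: rest, i, last_pass => cfB_go rest (i + 1) (if pyGate r then i else last_pass)

def count_consecutive_fails_py_alt (records : List (List (String × Bool))) : Int :=
  (records.length : Int) - 1 - cfB_go records 0 (-1)

-- ===== PRECONDITION & SPEC =====
def Spec_count_consecutive_fails_py (records : List (List (String × Bool))) (out : Int) : Prop := out = count_consecutive_fails_py_alt records
instance (records : List (List (String × Bool))) (out : Int) : Decidable (Spec_count_consecutive_fails_py records out) := by unfold Spec_count_consecutive_fails_py; infer_instance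

-- ===== CLAIM (what is proved, stated in full; the proofs are below) =====
def Claim_equal_count_consecutive_fails_py : Prop := ∀ (records : List (List (String × Bool))), Dom_count_consecutive_fails_py records → Spec_count_consecutive_fails_py records (count_consecutive_fails_py records)

-- ===== LEMMAS AND PROOFS =====

-- A's accumulator only shifts the result
lemma cfA_go_shift (l : List (List (String × Bool))) (c : Int) :
    cfA_go l c = cfA_go l 0 + c := by
  induction l generalizing c with
  | nil => simp [cfA_go]
  | cons r rest ih =>
    cases hg : pyGate r with
    | true => simp [cfA_go, hg]
    | false =>
      simp only [cfA_go, hg, Bool.false_eq_true, not_false_eq_true, if_true]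
      rw [ih (c + 1), ih (0 + 1)]
      ring

-- B's loop on a snoc: the last element wins if it passes
lemma cfB_go_snoc (l : List (List (String × Bool))) (r : List (String × Bool)) (i last : Int) :
    cfB_go (l ++ [r]) i last =
      if pyGate r then i + l.length else cfB_go l i last := by
  induction l generalizing i last with
  | nil => simp [cfB_go]
  | cons x rest ih =>
    simp only [List.cons_append, cfB_go, ih, List.length_cons]
    split_ifs <;> push_cast <;> ring_nf

lemma key (l : List (List (String × Bool))) :
    cfA_go l.reverse 0 = (l.length : Int) - 1 - cfB_go l 0 (-1) := by
  induction l using List.reverseRecOn with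
  | nil => simp [cfA_go, cfB_go]
  | append_singleton l r ih =>
    rw [List.reverse_append]
    simp only [List.reverse_singleton, List.singleton_append, cfA_go, cfB_go_snoc,
      List.length_append, List.length_singleton]
    cases hg : pyGate r with
    | true => simp
    | false =>
      simp only [Bool.false_eq_true, not_false_eq_true, if_true, if_false]
      rw [cfA_go_shift, ih]
      push_cast
      ring

-- ===== VERDICT (by name: the statement is the Claim_ definition above) =====
theorem count_consecutive_fails_py_spec : Claim_equal_count_consecutive_fails_py := by
  intro records _
  show count_consecutive_fails_py records = count_consecutive_fails_py_alt records
  unfold count_consecutive_fails_py count_consecutive_fails_py_alt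
  exact key records
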